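-- pv_equiv track=rewrite | github.com/branchesgit/py | classifiers/util/data.py | is_width_rate_of_change
-- ===== SOURCE A (Python) =====
-- def is_width_rate_of_change(values):
--     values.sort()
--     count = 0
--     min_value = values[0]
--     for value in values:
--         if value > 2 * min_value:
--             count += 1
--
--     return count >= 2
-- ===== SOURCE B (Python) =====
-- def is_width_rate_of_change(values):
--     values.sort()
--     return len(values) >= 2 and values[-2] > 2 * values[0]
-- ===== Notes on version B (the rewrite author's own statement) =====
-- stated objective: simpler
-- what changed: After sorting, the elements exceeding twice the minimum form a suffix, so the counting loop is replaced by one comparison of the second-largest element against 2*min.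
import Mathlib
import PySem

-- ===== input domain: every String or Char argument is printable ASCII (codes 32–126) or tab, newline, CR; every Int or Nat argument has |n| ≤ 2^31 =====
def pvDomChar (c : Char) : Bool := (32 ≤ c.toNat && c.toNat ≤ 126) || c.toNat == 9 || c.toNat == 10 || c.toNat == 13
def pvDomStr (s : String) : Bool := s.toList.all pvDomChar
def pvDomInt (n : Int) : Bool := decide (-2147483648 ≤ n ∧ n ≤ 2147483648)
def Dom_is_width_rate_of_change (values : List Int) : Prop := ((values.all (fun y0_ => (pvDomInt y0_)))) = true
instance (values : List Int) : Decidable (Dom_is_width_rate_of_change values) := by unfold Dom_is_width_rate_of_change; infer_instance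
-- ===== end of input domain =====

-- B replaces A's counting loop by one comparison: after sorting, values exceeding 2*min form a
-- suffix, so count >= 2 iff the second-to-last element exceeds 2*min (simpler; equivalence is about
-- the return value: in Python both A and B sort `values` in place).


-- ===== PORT A =====
def is_width_rate_of_change (values : List Int) : Bool :=
  let s := PySem.List.sorted values (fun x => x) false   -- values.sort()
  match PySem.List.pyGet? s 0 with                       -- min_value = first element
  | none => false                                        -- IndexError on []: excluded by Pre_
  | some min_value =>
    decide (2 ≤ s.foldl (fun count value => if value > 2 * min_value then count + 1 else count) (0 : Int))

-- ===== PORT B =====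
def is_width_rate_of_change_alt (values : List Int) : Bool :=
  let s := PySem.List.sorted values (fun x => x) false   -- values.sort()
  if 2 ≤ s.length then                                   -- len(values) >= 2 and …
    match PySem.List.pyGet? s (-2), PySem.List.pyGet? s 0 with
    | some a, some m => decide (a > 2 * m)               -- second-to-last exceeds twice the first
    | _, _ => false                                      -- unreachable when 2 ≤ length
  else
    false

-- ===== PRECONDITION & SPEC =====
-- A raises IndexError reading the minimum of the empty list; Pre_ excludes exactly that input.
def Pre_is_width_rate_of_change (values : List Int) : Prop := values ≠ []
instance (values : List Int) : Decidable (Pre_is_width_rate_of_change values) := by unfold Pre_is_width_rate_of_change; infer_instance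
def pvWitness_is_width_rate_of_change : List Int := [1, 3, 4]

def Spec_is_width_rate_of_change (values : List Int) (out : Bool) : Prop := out = is_width_rate_of_change_alt values
instance (values : List Int) (out : Bool) : Decidable (Spec_is_width_rate_of_change values out) := by unfold Spec_is_width_rate_of_change; infer_instance

-- ===== CLAIM (what is proved, stated in full; the proofs are below) =====
def Claim_equal_is_width_rate_of_change : Prop := ∀ (values : List Int), Dom_is_width_rate_of_change values → Pre_is_width_rate_of_change values → Spec_is_width_rate_of_change values (is_width_rate_of_change values)

-- ===== LEMMAS AND PROOFS =====

-- On a ≤-sorted list, at least two elements exceed t iff the list has ≥ 2 elements and its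
-- second-to-last element exceeds t (the elements exceeding t form a suffix).
lemma count_ge_two_iff (t : Int) : ∀ s : List Int, s.Pairwise (· ≤ ·) →
    (2 ≤ s.countP (fun v => decide (t < v)) ↔ 2 ≤ s.length ∧ t < s.getD (s.length - 2) 0) := by
  intro s
  induction s with
  | nil => simp
  | cons a s ih =>
    intro hp
    rcases List.pairwise_cons.mp hp with ⟨ha, hs⟩
    match s, hs with
    | [], _ =>
      simp [List.countP_cons]
      split <;> omega
    | [b], hs =>
      have hab : a ≤ b := ha b (by simp)
      simp [List.countP_cons]
      constructor
      · intro h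
        by_cases h1 : t < a
        · exact h1
        · by_cases h2 : t < b <;> simp [h1, h2] at h
      · intro h
        have hb : t < b := lt_of_lt_of_le h hab
        simp [h, hb]
    | b :: c :: u, hs =>
      have hget : (a :: b :: c :: u).getD ((a :: b :: c :: u).length - 2) 0
          = (b :: c :: u).getD ((b :: c :: u).length - 2) 0 := by
        simp [List.getD]
        rfl
      rw [List.countP_cons, hget]
      have key := ih hs
      constructor
      · intro h
        refine ⟨by simp, ?_⟩
        by_cases hpa : t < a
        · have hall : (b :: c :: u).countP (fun v => decide (t < v)) = (b :: c :: u).length := by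
            rw [List.countP_eq_length]
            intro x hx
            exact decide_eq_true (lt_of_lt_of_le hpa (ha x hx))
          exact (key.mp (by rw [hall]; simp)).2
        · simp [hpa] at h
          exact (key.mp h).2
      · intro ⟨_, hlt⟩
        have h2 := key.mpr ⟨by simp, hlt⟩
        omega

theorem is_width_rate_of_change_spec : Claim_equal_is_width_rate_of_change := by
  intro values _ hpre
  unfold Spec_is_width_rate_of_change is_width_rate_of_change is_width_rate_of_change_alt
  simp only []
  generalize hsdef : PySem.List.sorted values (fun x => x) false = s
  have hsne : s ≠ [] := by rw [← hsdef, Ne, PySem.List.sorted_eq_nil_iff]; exact hpre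
  obtain ⟨m, rest, hms⟩ : ∃ m rest, s = m :: rest := by
    cases hsc : s with
    | nil => exact absurd hsc hsne
    | cons x xs => exact ⟨x, xs, rfl⟩
  have hget0 : PySem.List.pyGet? s 0 = some m := by
    rw [hms]; exact PySem.List.pyGet?_zero_cons m rest
  have hpw : s.Pairwise (· ≤ ·) := by
    rw [← hsdef]; exact PySem.List.sorted_pairwise values (fun x => x)
  have key := count_ge_two_iff (2 * m) s hpw
  simp only [hget0, gt_iff_lt]
  have hf := PySem.List.foldl_count_if (fun value => decide (2 * m < value)) s 0
  simp only [decide_eq_true_eq] at hf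
  rw [hf]
  by_cases hlen : 2 ≤ s.length
  · have hlt : s.length - 2 < s.length := by omega
    have hneg : PySem.List.pyGet? s (-2) = some s[s.length - 2] := by
      rw [PySem.List.pyGet?_neg_ofNat s 2 (by omega) hlen, List.getElem?_eq_getElem hlt]
    simp only [hneg, if_pos hlen]
    rw [List.getD_eq_getElem s 0 hlt] at key
    rw [decide_eq_decide]
    rw [zero_add]
    constructor
    · intro h
      have := (key.mp (by exact_mod_cast h)).2
      simpa using this
    · intro h
      have := key.mpr ⟨hlen, by simpa using h⟩
      exact_mod_cast this
  · rw [if_neg hlen]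
    have hnot : ¬ (2 ≤ s.countP (fun v => decide (2 * m < v))) := fun h => hlen (key.mp h).1
    simp only [decide_eq_false_iff_not]
    omega
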